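-- pv_equiv track=rewrite | github.com/rajatdiptabiswas/competitive-programming | CodeChef/SQRDSUB-v4.py | two_gen
-- ===== SOURCE A (Python) =====
-- def two_gen(l,r):
--     if min(l,r) == 0:
--         return max(l,r)+1
--
--     upper_limit = min(l,r)+1
--     digits = l+r+1
--
--     total = 0
--     for i in range(1, digits//2+1):
--         total += 2 * min(i, upper_limit)
--
--     if digits % 2 == 1:
--         total += upper_limit
--
--     return total
-- ===== SOURCE B (Python) =====
-- def two_gen(l, r):
--     if min(l, r) == 0:
--         return max(l, r) + 1
--     u = min(l, r) + 1
--     d = l + r + 1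
--     m = d // 2
--     if m < 1:
--         total = 0
--     elif u >= m:
--         total = m * (m + 1)
--     elif u < 1:
--         total = 2 * u * m
--     else:
--         total = u * (u + 1) + 2 * u * (m - u)
--     if d % 2 == 1:
--         total += u
--     return total
-- ===== Notes on version B (the rewrite author's own statement) =====
-- stated objective: faster
-- what changed: Replaced A's summation loop over range(1, digits//2+1) with a closed-form piecewise triangular-sum formula evaluated in O(1).
import Mathlib
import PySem

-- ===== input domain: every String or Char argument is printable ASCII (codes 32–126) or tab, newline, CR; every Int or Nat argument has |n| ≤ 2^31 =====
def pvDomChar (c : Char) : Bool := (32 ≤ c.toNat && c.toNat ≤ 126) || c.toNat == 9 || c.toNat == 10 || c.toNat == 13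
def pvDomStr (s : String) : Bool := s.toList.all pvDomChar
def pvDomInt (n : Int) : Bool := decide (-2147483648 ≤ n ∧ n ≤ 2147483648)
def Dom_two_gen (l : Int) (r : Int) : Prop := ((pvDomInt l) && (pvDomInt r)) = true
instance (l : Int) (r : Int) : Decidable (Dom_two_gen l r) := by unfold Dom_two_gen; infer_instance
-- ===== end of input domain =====

-- B replaces A's O(l+r) summation loop by a closed-form piecewise triangular formula (objective: faster, asymptotic O(1)).

-- ===== PORT A =====
def two_gen (l : Int) (r : Int) : Int :=
  if min l r == 0 then max l r + 1
  else
    let upper_limit := min l r + 1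
    let digits := l + r + 1
    let total : Int :=
      (PySem.List.pyRange 1 (PySem.Int.floordiv digits 2 + 1) 1).foldl
        (fun total i => total + 2 * min i upper_limit) 0
    let total := if PySem.Int.mod digits 2 == 1 then total + upper_limit else total
    total

-- ===== PORT B =====
def two_gen_alt (l : Int) (r : Int) : Int :=
  if min l r == 0 then max l r + 1
  else
    let u := min l r + 1
    let d := l + r + 1
    let m := PySem.Int.floordiv d 2
    let total : Int :=
      if m < 1 then 0
      else if u ≥ m then m * (m + 1)
      else if u < 1 then 2 * u * m
      else u * (u + 1) + 2 * u * (m - u)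
    let total := if PySem.Int.mod d 2 == 1 then total + u else total
    total

-- ===== PRECONDITION & SPEC =====
def Spec_two_gen (l : Int) (r : Int) (out : Int) : Prop := out = two_gen_alt l r
instance (l : Int) (r : Int) (out : Int) : Decidable (Spec_two_gen l r out) := by unfold Spec_two_gen; infer_instance

-- ===== CLAIM (what is proved, stated in full; the proofs are below) =====
def Claim_equal_two_gen : Prop := ∀ (l : Int) (r : Int), Dom_two_gen l r → Spec_two_gen l r (two_gen l r)

-- ===== LEMMAS AND PROOFS =====

/-- closed form of A's loop total -/
def pvF (m u : Int) : Int :=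
  if m < 1 then 0
  else if u ≥ m then m * (m + 1)
  else if u < 1 then 2 * u * m
  else u * (u + 1) + 2 * u * (m - u)

lemma pvF_of_lt (m u : Int) (h : m < 1) : pvF m u = 0 := by
  unfold pvF; rw [if_pos h]

lemma pvF_of_ge (m u : Int) (h1 : ¬ m < 1) (h2 : u ≥ m) : pvF m u = m * (m + 1) := by
  unfold pvF; rw [if_neg h1, if_pos h2]

lemma pvF_of_ulow (m u : Int) (h1 : ¬ m < 1) (h2 : ¬ u ≥ m) (h3 : u < 1) : pvF m u = 2 * u * m := by
  unfold pvF; rw [if_neg h1, if_neg h2, if_pos h3]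

lemma pvF_of_mid (m u : Int) (h1 : ¬ m < 1) (h2 : ¬ u ≥ m) (h3 : ¬ u < 1) :
    pvF m u = u * (u + 1) + 2 * u * (m - u) := by
  unfold pvF; rw [if_neg h1, if_neg h2, if_neg h3]

lemma pvF_step (m u : Int) (hm : 1 ≤ m) : pvF m u = pvF (m - 1) u + 2 * min m u := by
  by_cases hu1 : u < 1
  · rw [min_eq_right (by omega), pvF_of_ulow m u (by omega) (by omega) hu1]
    by_cases hm1 : m = 1
    · subst hm1; rw [pvF_of_lt (1 - 1) u (by omega)]; ring
    · rw [pvF_of_ulow (m - 1) u (by omega) (by omega) hu1]; ring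
  · by_cases hum : u ≥ m
    · rw [min_eq_left (by omega), pvF_of_ge m u (by omega) hum]
      by_cases hm1 : m = 1
      · subst hm1; rw [pvF_of_lt (1 - 1) u (by omega)]; norm_num
      · rw [pvF_of_ge (m - 1) u (by omega) (by omega)]; ring
    · rw [min_eq_right (by omega), pvF_of_mid m u (by omega) hum (by omega)]
      by_cases hum1 : u ≥ m - 1
      · have h4 : u = m - 1 := by omega
        subst h4
        rw [pvF_of_ge (m - 1) (m - 1) (by omega) (by omega)]; ring
      · rw [pvF_of_mid (m - 1) u (by omega) hum1 (by omega)]; ring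

lemma pv_sum_nat (u : Int) : ∀ (k : Nat),
    (PySem.List.pyRange 1 ((k : Int) + 1) 1).foldl (fun t i => t + 2 * min i u) 0 = pvF (k : Int) u := by
  intro k
  induction k with
  | zero =>
      rw [PySem.List.pyRange_one_eq_nil (by norm_num)]
      simp [pvF]
  | succ n ih =>
      have h : PySem.List.pyRange 1 ((n + 1 : Nat) + 1) 1
          = PySem.List.pyRange 1 ((n : Int) + 1) 1 ++ [(n : Int) + 1] := by
        have := PySem.List.pyRange_one_succ_right (a := 1) (b := (n : Int) + 1) (by omega)
        push_cast
        convert this using 2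
      rw [h, List.foldl_append, ih]
      simp only [List.foldl_cons, List.foldl_nil]
      have hstep := pvF_step ((n : Int) + 1) u (by omega)
      have hsimp : ((n : Int) + 1 - 1) = (n : Int) := by ring
      rw [hsimp] at hstep
      push_cast
      omega

lemma pv_sum (u m : Int) :
    (PySem.List.pyRange 1 (m + 1) 1).foldl (fun t i => t + 2 * min i u) 0 = pvF m u := by
  rcases le_total m 0 with hm | hm
  · rw [PySem.List.pyRange_one_eq_nil (by omega)]
    simp only [List.foldl_nil]
    unfold pvF
    rw [if_pos (by omega)]
  · have h : m = (m.toNat : Int) := by omega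
    rw [h]
    exact pv_sum_nat u m.toNat

-- ===== VERDICT (by name: the statement is the Claim_ definition above) =====
theorem two_gen_spec : Claim_equal_two_gen := by
  intro l r _
  unfold Spec_two_gen two_gen two_gen_alt
  by_cases h : min l r == 0
  · simp [h]
  · simp only [h, Bool.false_eq_true, if_false]
    rw [pv_sum]
    rfl
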